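-- pv_equiv track=rewrite | github.com/NikolaRaicevic2001/ECE143 | Homework/Week_03/Word_Processing/word_processing.py | get_most_common_end
-- ===== SOURCE A (Python) =====
-- def get_most_common_end(words):
--     '''
--     Function that outputs the most common ending letter in the words list.
--
--     Args:
--         words(list): List of words to be checked.
--
--     Return:
--         most_common_end(string): The most common ending letter.
--
--     Raises:
--         AssertionError: If the input words is not list of strings.
--     '''
--     # Input Validation
--     assert isinstance(words, list),"The input words need to be of type list"
--     assert all(isinstance(word,str) for word in words),"All elements in the list need to be of type string"
--
--     from collections import Counter
--     starting_letters = [word[-1].lower() for word in words]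
--     most_common = Counter(starting_letters).most_common(1)
--
--     most_common_end = most_common[0][0] if most_common else ""
--
--     return most_common_end
-- ===== SOURCE B (Python) =====
-- def get_most_common_end(words):
--     """Most common ending letter by brute force re-counting: walk the last
--     letters, and at each letter's FIRST occurrence recompute its frequency
--     with list.count; a strict-greater argmax keeps the earliest letter on
--     ties (Counter's insertion-order tie-break). No Counter/dict and no sort."""
--     assert isinstance(words, list), "The input words need to be of type list"
--     assert all(isinstance(word, str) for word in words), "All elements in the list need to be of type string"
--
--     tails = [word[-1].lower() for word in words]
--     best, best_count, seen = "", 0, []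
--     for t in tails:
--         if t not in seen:
--             seen.append(t)
--             c = tails.count(t)
--             if c > best_count:
--                 best, best_count = t, c
--     return best
-- ===== Notes on version B (the rewrite author's own statement) =====
-- stated objective: alternative
-- what changed: Replaces Counter(...).most_common(1) with a scan that, at each last letter's first occurrence, recomputes its frequency from scratch with list.count and keeps a strict-greater running argmax; there is no counting structure (Counter/dict) and no sort.
import Mathlib
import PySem

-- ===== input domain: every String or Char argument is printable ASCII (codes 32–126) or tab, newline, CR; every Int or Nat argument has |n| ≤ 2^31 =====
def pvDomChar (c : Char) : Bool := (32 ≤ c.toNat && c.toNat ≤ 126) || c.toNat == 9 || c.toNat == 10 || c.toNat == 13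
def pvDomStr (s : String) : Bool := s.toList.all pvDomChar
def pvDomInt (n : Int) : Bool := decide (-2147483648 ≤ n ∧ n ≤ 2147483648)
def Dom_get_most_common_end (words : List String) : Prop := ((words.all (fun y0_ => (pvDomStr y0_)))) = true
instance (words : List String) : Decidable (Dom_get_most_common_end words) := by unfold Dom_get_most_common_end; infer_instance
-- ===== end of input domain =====

-- B replaces Counter(...).most_common(1) with a brute-force nested-scan argmax using
-- list.count inside a strict-greater loop: no counting structure and no sort (alternative).
-- The equivalence is about the return value; neither program mutates its argument.

-- ===== PORT A =====
-- word[-1].lower(); the 'a' default is unreachable under Pre_ (Python raises IndexError there)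
def pvEndLetter (w : String) : String :=
  PySem.Str.lower (String.ofList [(PySem.Str.pyGet? w (-1)).getD 'a'])

def get_most_common_end (words : List String) : String :=
  let starting_letters := words.map pvEndLetter
  let most_common :=
    (PySem.List.sorted (PySem.Dict.counter starting_letters).items (fun p => p.2) true).take 1
  match most_common with
  | p :: _ => p.1
  | [] => ""

-- ===== PORT B =====
-- state = ((best, best_count), seen); Python's 'if t not in seen: seen.append(t); c = tails.count(t); …'
def get_most_common_end_alt (words : List String) : String :=
  let tails := words.map pvEndLetter
  (tails.foldl (fun (st : (String × Int) × List String) t =>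
      if st.2.contains t then st
      else
        let c : Int := (PySem.List.count tails t : Int)
        (if st.1.2 < c then (t, c) else st.1, st.2 ++ [t])) (("", 0), [])).1.1

-- ===== PRECONDITION & SPEC =====
-- Pre_ excludes exactly the inputs where Python A raises IndexError (an empty string in the list)
def Pre_get_most_common_end (words : List String) : Prop := ∀ w ∈ words, w ≠ ""
instance (words : List String) : Decidable (Pre_get_most_common_end words) := by
  unfold Pre_get_most_common_end; infer_instance

def pvWitness_get_most_common_end : List String := ["cat", "dog", "pig"]

def Spec_get_most_common_end (words : List String) (out : String) : Prop := out = get_most_common_end_alt words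
instance (words : List String) (out : String) : Decidable (Spec_get_most_common_end words out) := by unfold Spec_get_most_common_end; infer_instance

-- ===== CLAIM (what is proved, stated in full; the proofs are below) =====
def Claim_equal_get_most_common_end : Prop := ∀ (words : List String), Dom_get_most_common_end words → Pre_get_most_common_end words → Spec_get_most_common_end words (get_most_common_end words)

-- ===== LEMMAS AND PROOFS =====

-- the step shared by reverse insertion sort's head and the argmax over counter items
def pvMaxStep (o : Option (String × Int)) (x : String × Int) : Option (String × Int) :=
  match o with
  | none => some x
  | some m => if m.2 < x.2 then some x else some m

theorem head?_insertBy (x : String × Int) (acc : List (String × Int)) :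
    (PySem.List.insertBy (fun a b => decide (b.2 < a.2)) x acc).head? = pvMaxStep acc.head? x := by
  cases acc with
  | nil => rfl
  | cons y ys =>
    simp only [PySem.List.insertBy, pvMaxStep, List.head?]
    split_ifs with h <;> simp_all

theorem head?_foldl_insertBy (xs acc : List (String × Int)) :
    (xs.foldl (fun acc x => PySem.List.insertBy (fun a b => decide (b.2 < a.2)) x acc) acc).head?
      = xs.foldl pvMaxStep acc.head? := by
  induction xs generalizing acc with
  | nil => rfl
  | cons x xs ih =>
    simp only [List.foldl_cons, ih, head?_insertBy]

-- head of the reverse stable sort by count = the strict-greater argmax fold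
theorem head?_sorted_rev (items : List (String × Int)) :
    (PySem.List.sorted items (fun p => p.2) true).head? = items.foldl pvMaxStep none := by
  rw [PySem.List.sorted_rev_eq_foldl_insertBy]
  exact head?_foldl_insertBy items []

-- B's argmax step, with the count function abstracted
def pvArgStep (c : String → Int) (b : String × Int) (t : String) : String × Int :=
  if b.2 < c t then (t, c t) else b

-- ordered first-occurrence dedup relative to a seen list
def pvDD (c : String → Int) (s : List String) : List String → List String
  | [] => []
  | x :: l => if s.contains x then pvDD c s l else x :: pvDD c (x :: s) l

theorem pvDD_congr (c : String → Int) (s s' : List String)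
    (h : ∀ u, u ∈ s ↔ u ∈ s') : ∀ l, pvDD c s l = pvDD c s' l := by
  intro l
  induction l generalizing s s' with
  | nil => rfl
  | cons x l ih =>
    simp only [pvDD, List.contains_iff_mem]
    by_cases hx : x ∈ s
    · rw [if_pos (by simpa using hx), if_pos (by simpa using (h x).mp hx)]
      exact ih s s' h
    · rw [if_neg (by simpa using hx), if_neg (by simpa using fun hy => hx ((h x).mpr hy))]
      exact congrArg (x :: ·) (ih (x :: s) (x :: s') (by intro u; simp [h u]))

-- B's fused loop (argmax + seen list) = argmax fold over the ordered dedup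
theorem foldl_fused (c : String → Int) :
    ∀ (l : List String) (s : List String) (b : String × Int),
      (l.foldl (fun (st : (String × Int) × List String) t =>
          if st.2.contains t then st
          else (pvArgStep c st.1 t, st.2 ++ [t])) (b, s)).1
        = (pvDD c s l).foldl (pvArgStep c) b := by
  intro l
  induction l with
  | nil => intro s b; rfl
  | cons x l ih =>
    intro s b
    simp only [pvDD, List.foldl_cons]
    by_cases hx : s.contains x
    · rw [if_pos hx, if_pos hx]
      exact ih s b
    · rw [if_neg hx, if_neg hx, List.foldl_cons, ih (s ++ [x]) (pvArgStep c b x),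
          pvDD_congr c (s ++ [x]) (x :: s) (by intro u; simp [or_comm]) l]

-- Set.ofList (= Set.update from []) is pvDD from the empty seen list
theorem update_eq_append_pvDD (c : String → Int) :
    ∀ (l s : List String), PySem.Set.update s l = s ++ pvDD c s l := by
  intro l
  induction l with
  | nil => intro s; simp [PySem.Set.update, pvDD]
  | cons x l ih =>
    intro s
    rw [PySem.Set.update_cons]
    by_cases hx : s.contains x
    · have hxm : x ∈ s := by simpa [List.contains_iff_mem] using hx
      have hadd : PySem.Set.add s x = s := by simp [PySem.Set.add, PySem.Set.contains, hxm]
      rw [hadd, ih s]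
      simp [pvDD, hxm]
    · have hxm : x ∉ s := by simpa [List.contains_iff_mem] using hx
      have hadd : PySem.Set.add s x = s ++ [x] := by
        simp [PySem.Set.add, PySem.Set.contains, hxm]
      rw [hadd, ih (s ++ [x])]
      have : pvDD c (s ++ [x]) l = pvDD c (x :: s) l :=
        pvDD_congr c (s ++ [x]) (x :: s) (by intro u; simp [or_comm]) l
      simp [pvDD, hxm, this]

theorem ofList_eq_pvDD (c : String → Int) (l : List String) :
    PySem.Set.ofList l = pvDD c [] l := by
  have h := update_eq_append_pvDD c l []
  simpa [PySem.Set.update, PySem.Set.ofList_eq_foldl] using h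

-- the pvMaxStep fold over (k, c k) pairs, started from some m, is the argmax fold
theorem foldl_maxStep_map (c : String → Int) :
    ∀ (d : List String) (m : String × Int),
      (d.map (fun k => (k, c k))).foldl pvMaxStep (some m)
        = some (d.foldl (pvArgStep c) m) := by
  intro d
  induction d with
  | nil => intro m; rfl
  | cons k d ih =>
    intro m
    simp only [List.map_cons, List.foldl_cons, pvMaxStep, pvArgStep]
    split_ifs <;> exact ih _

def pvOfMax (o : Option (String × Int)) : String × Option Int :=
  match o with
  | none => ("", none)
  | some p => (p.1, some p.2)

-- main bridge: argmax over the ordered dedup = argmax over the counter's items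
theorem argmax_eq (tails : List String) :
    ((PySem.Set.ofList tails).foldl (pvArgStep (fun t => (tails.count t : Int))) ("", 0)).1
      = (pvOfMax (((PySem.Set.ofList tails).map
          (fun k => (k, (tails.count k : Int)))).foldl pvMaxStep none)).1 := by
  set c : String → Int := fun t => (tails.count t : Int) with hc
  cases hd : PySem.Set.ofList tails with
  | nil => simp [pvOfMax]
  | cons k d =>
    have hk : k ∈ tails := (PySem.Set.mem_ofList tails k).mp (by rw [hd]; exact List.mem_cons_self ..)
    have hkpos : (0 : Int) < c k := by
      simp only [hc]
      exact_mod_cast List.count_pos_iff.mpr hk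
    simp only [List.map_cons, List.foldl_cons]
    have h1 : pvMaxStep none (k, c k) = some (k, c k) := rfl
    have h2 : pvArgStep c ("", 0) k = (k, c k) := by
      simp [pvArgStep, hkpos]
    rw [h1, h2, foldl_maxStep_map c d (k, c k), pvOfMax]

-- ===== VERDICT (by name: the statement is the Claim_ definition above) =====
theorem get_most_common_end_spec : Claim_equal_get_most_common_end := by
  intro words _ _
  unfold Spec_get_most_common_end
  simp only [get_most_common_end, get_most_common_end_alt]
  set tails := words.map pvEndLetter with htails
  have hitems : (PySem.Dict.counter tails).items
      = (PySem.Set.ofList tails).map (fun k => (k, (tails.count k : Int))) :=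
    PySem.Dict.items_counter tails
  have hstep : (fun (st : (String × Int) × List String) t =>
      if st.2.contains t then st
      else
        let c : Int := (PySem.List.count tails t : Int)
        (if st.1.2 < c then (t, c) else st.1, st.2 ++ [t]))
      = (fun (st : (String × Int) × List String) t =>
          if st.2.contains t then st
          else (pvArgStep (fun t => (tails.count t : Int)) st.1 t, st.2 ++ [t])) := by
    funext st t
    simp only [pvArgStep, PySem.List.count_eq]
  rw [hstep, hitems,
      foldl_fused (fun t => (tails.count t : Int)) tails [] ("", 0),
      ← ofList_eq_pvDD (fun t => (tails.count t : Int)) tails]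
  have h := head?_sorted_rev ((PySem.Set.ofList tails).map
      (fun k => (k, (tails.count k : Int))))
  rw [argmax_eq tails]
  cases hm : ((PySem.Set.ofList tails).map
      (fun k => (k, (tails.count k : Int)))).foldl pvMaxStep none with
  | none =>
    rw [hm] at h
    rcases List.head?_eq_none_iff.mp h with hnil
    simp [hnil, pvOfMax]
  | some p =>
    rw [hm] at h
    rcases List.head?_eq_some_iff.mp h with ⟨t, ht⟩
    simp [ht, pvOfMax]
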